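-- pv_equiv track=rewrite | github.com/radiating-pumpkin0Zed/pixel-ecosystem | generation.py | make_shape
-- ===== SOURCE A (Python) =====
-- def make_shape(word, size):
--     shape_type = sum(ord(c) for c in word) % 4
--     shape = []
--
--     for i in range(size):
--         for j in range(size):
--             add_pixel = False
--
--             if shape_type == 0:
--                 if j >= 1 and j < size-1:
--                     add_pixel = True
--                 if i >= 1 and i < size-1 and j == size-1:
--                     add_pixel = True
--                 if size >= 5 and j == 0 and i >= 2 and i < size-2:
--                     add_pixel = True
--             elif shape_type == 1:
--                 if i >= 1 and i < size-1 and j >= 1 and j < size-1: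
--                     add_pixel = True
--                 if j == 1 and i >= 1 and i < size-1:
--                     add_pixel = True
--                 if j == size-2 and i >= 1 and i < size-1:
--                     add_pixel = True
--                 if j == 0 and i >= 2 and i < size-2:
--                     add_pixel = True
--             elif shape_type == 2:
--                 if j >= 1 and j < size-1 and i >= 1 and i < size-1:
--                     add_pixel = True
--                 if abs(i - size//2) <= 1:
--                     add_pixel = True
--                 if j == size-2 and i >= 1 and i < size-1:
--                     add_pixel = True
--                 if j == 0 and i == size//2:
--                     add_pixel = True
--             else:
--                 if i >= 1 and i < size-1 and j >= 1 and j < size-1: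
--                     add_pixel = True
--                 if j == 0 and i >= 1 and i < size-1:
--                     add_pixel = True
--                 if j == size-1 and i >= 1 and i < size-1:
--                     add_pixel = True
--                 if j == 1 and (i == 0 or i == size-1):
--                     add_pixel = True
--
--             if add_pixel:
--                 shape.append((i, j))
--
--     return shape
-- ===== SOURCE B (Python) =====
-- def make_shape(word, size):
--     t = sum(ord(c) for c in word) % 4
--     out = []
--     for i in range(size):
--         if t == 0:
--             row = ([0] if size >= 5 and 2 <= i < size - 2 else [])
--             row += range(1, size - 1)
--             if 1 <= i < size - 1:
--                 row.append(size - 1)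
--         elif t == 1:
--             if 1 <= i < size - 1:
--                 row = ([0] if 2 <= i < size - 2 else [])
--                 row += range(1, size - 1)
--             else:
--                 row = []
--         elif t == 2:
--             if abs(i - size // 2) <= 1:
--                 row = list(range(size))
--             elif 1 <= i < size - 1:
--                 row = list(range(1, size - 1))
--             else:
--                 row = []
--         else:
--             if 1 <= i < size - 1:
--                 row = list(range(size))
--             elif size >= 2:
--                 row = [1]
--             else:
--                 row = []
--         out.extend((i, j) for j in row)
--     return out
-- ===== Notes on version B (the rewrite author's own statement) =====
-- stated objective: alternative
-- what changed: B builds each row's pixel run directly as explicit range segments per shape type (body fill, edge column, centre band, corner pixel) instead of A's per-cell boolean test over every (i,j) of the grid.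
import Mathlib
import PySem

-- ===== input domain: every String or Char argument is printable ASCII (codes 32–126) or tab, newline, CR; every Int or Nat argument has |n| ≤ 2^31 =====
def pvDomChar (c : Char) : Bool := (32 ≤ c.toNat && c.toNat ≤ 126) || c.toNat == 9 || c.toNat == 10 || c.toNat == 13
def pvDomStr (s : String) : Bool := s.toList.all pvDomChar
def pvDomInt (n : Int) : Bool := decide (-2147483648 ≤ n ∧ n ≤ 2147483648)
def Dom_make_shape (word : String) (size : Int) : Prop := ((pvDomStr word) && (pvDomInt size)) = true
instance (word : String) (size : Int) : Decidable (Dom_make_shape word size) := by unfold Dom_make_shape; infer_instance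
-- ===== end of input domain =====

-- B replaces A's per-cell test over the whole grid by direct per-row segment construction
-- (objective: alternative decomposition, same asymptotic cost).

-- ===== PORT A =====
-- the sequence of 'if …: add_pixel = True' statements of A, as the Bool it leaves in add_pixel
def pvCondA (st size i j : Int) : Bool :=
  if st = 0 then
    if 1 ≤ j ∧ j < size - 1 then true
    else if 1 ≤ i ∧ i < size - 1 ∧ j = size - 1 then true
    else if 5 ≤ size ∧ j = 0 ∧ 2 ≤ i ∧ i < size - 2 then true
    else false
  else if st = 1 then
    if 1 ≤ i ∧ i < size - 1 ∧ 1 ≤ j ∧ j < size - 1 then true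
    else if j = 1 ∧ 1 ≤ i ∧ i < size - 1 then true
    else if j = size - 2 ∧ 1 ≤ i ∧ i < size - 1 then true
    else if j = 0 ∧ 2 ≤ i ∧ i < size - 2 then true
    else false
  else if st = 2 then
    if 1 ≤ j ∧ j < size - 1 ∧ 1 ≤ i ∧ i < size - 1 then true
    else if |i - PySem.Int.floordiv size 2| ≤ 1 then true
    else if j = size - 2 ∧ 1 ≤ i ∧ i < size - 1 then true
    else if j = 0 ∧ i = PySem.Int.floordiv size 2 then true
    else false
  else
    if 1 ≤ i ∧ i < size - 1 ∧ 1 ≤ j ∧ j < size - 1 then true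
    else if j = 0 ∧ 1 ≤ i ∧ i < size - 1 then true
    else if j = size - 1 ∧ 1 ≤ i ∧ i < size - 1 then true
    else if j = 1 ∧ (i = 0 ∨ i = size - 1) then true
    else false

def make_shape (word : String) (size : Int) : List (Int × Int) :=
  let shape_type : Int :=
    PySem.Int.mod (word.toList.foldl (fun a c => a + (c.toNat : Int)) 0) 4
  (PySem.List.pyRange 0 size 1).foldl (fun shape i =>
    (PySem.List.pyRange 0 size 1).foldl (fun shape j =>
      if pvCondA shape_type size i j then shape ++ [(i, j)] else shape) shape) []

-- ===== PORT B =====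
-- the j-segments of row i, built directly (Source B's per-shape row construction)
def pvRowB (t size i : Int) : List Int :=
  if t = 0 then
    (if 5 ≤ size ∧ 2 ≤ i ∧ i < size - 2 then [(0 : Int)] else []) ++
      PySem.List.pyRange 1 (size - 1) 1 ++
      (if 1 ≤ i ∧ i < size - 1 then [size - 1] else [])
  else if t = 1 then
    if 1 ≤ i ∧ i < size - 1 then
      (if 2 ≤ i ∧ i < size - 2 then [(0 : Int)] else []) ++ PySem.List.pyRange 1 (size - 1) 1
    else []
  else if t = 2 then
    if |i - PySem.Int.floordiv size 2| ≤ 1 then PySem.List.pyRange 0 size 1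
    else if 1 ≤ i ∧ i < size - 1 then PySem.List.pyRange 1 (size - 1) 1
    else []
  else
    if 1 ≤ i ∧ i < size - 1 then PySem.List.pyRange 0 size 1
    else if 2 ≤ size then [(1 : Int)]
    else []

def make_shape_alt (word : String) (size : Int) : List (Int × Int) :=
  let t : Int :=
    PySem.Int.mod (word.toList.foldl (fun a c => a + (c.toNat : Int)) 0) 4
  (PySem.List.pyRange 0 size 1).foldl (fun out i =>
    out ++ (pvRowB t size i).map (fun j => (i, j))) []

-- ===== PRECONDITION & SPEC =====
def Spec_make_shape (word : String) (size : Int) (out : List (Int × Int)) : Prop := out = make_shape_alt word size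
instance (word : String) (size : Int) (out : List (Int × Int)) : Decidable (Spec_make_shape word size out) := by unfold Spec_make_shape; infer_instance

-- ===== CLAIM (what is proved, stated in full; the proofs are below) =====
def Claim_equal_make_shape : Prop := ∀ (word : String) (size : Int), Dom_make_shape word size → Spec_make_shape word size (make_shape word size)

-- ===== LEMMAS AND PROOFS =====

theorem pv_eq_decide {b : Bool} {P : Prop} [Decidable P] (h : b = true ↔ P) : b = decide P := by
  by_cases hP : P
  · simp [hP, h.mpr hP]
  · rw [decide_eq_false hP]
    exact Bool.eq_false_iff.mpr (fun hb => hP (h.mp hb))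

theorem pv_chain3 {A B C : Prop} [Decidable A] [Decidable B] [Decidable C] :
    ((if A then true else if B then true else if C then true else false) = true) ↔
      (A ∨ B ∨ C) := by
  split_ifs <;> simp_all

theorem pv_chain4 {A B C D : Prop} [Decidable A] [Decidable B] [Decidable C] [Decidable D] :
    ((if A then true else if B then true else if C then true else if D then true else false) = true) ↔
      (A ∨ B ∨ C ∨ D) := by
  split_ifs <;> simp_all

theorem pvCondA0_iff (size i j : Int) : pvCondA 0 size i j = true ↔
    ((1 ≤ j ∧ j < size - 1) ∨ (1 ≤ i ∧ i < size - 1 ∧ j = size - 1) ∨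
      (5 ≤ size ∧ j = 0 ∧ 2 ≤ i ∧ i < size - 2)) := by
  unfold pvCondA
  rw [if_pos rfl]
  exact pv_chain3

theorem pvCondA1_iff (size i j : Int) : pvCondA 1 size i j = true ↔
    ((1 ≤ i ∧ i < size - 1 ∧ 1 ≤ j ∧ j < size - 1) ∨ (j = 1 ∧ 1 ≤ i ∧ i < size - 1) ∨
      (j = size - 2 ∧ 1 ≤ i ∧ i < size - 1) ∨ (j = 0 ∧ 2 ≤ i ∧ i < size - 2)) := by
  unfold pvCondA
  rw [if_neg (by norm_num : ¬(1 : Int) = 0), if_pos rfl]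
  exact pv_chain4

theorem pvCondA2_iff (size i j : Int) : pvCondA 2 size i j = true ↔
    ((1 ≤ j ∧ j < size - 1 ∧ 1 ≤ i ∧ i < size - 1) ∨
      (-1 ≤ i - PySem.Int.floordiv size 2 ∧ i - PySem.Int.floordiv size 2 ≤ 1) ∨
      (j = size - 2 ∧ 1 ≤ i ∧ i < size - 1) ∨ (j = 0 ∧ i = PySem.Int.floordiv size 2)) := by
  unfold pvCondA
  rw [if_neg (by norm_num : ¬(2 : Int) = 0), if_neg (by norm_num : ¬(2 : Int) = 1),
      if_pos rfl]
  rw [pv_chain4, abs_le]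

theorem pvCondA3_iff (size i j : Int) : pvCondA 3 size i j = true ↔
    ((1 ≤ i ∧ i < size - 1 ∧ 1 ≤ j ∧ j < size - 1) ∨ (j = 0 ∧ 1 ≤ i ∧ i < size - 1) ∨
      (j = size - 1 ∧ 1 ≤ i ∧ i < size - 1) ∨ (j = 1 ∧ (i = 0 ∨ i = size - 1))) := by
  unfold pvCondA
  rw [if_neg (by norm_num : ¬(3 : Int) = 0), if_neg (by norm_num : ¬(3 : Int) = 1),
      if_neg (by norm_num : ¬(3 : Int) = 2)]
  exact pv_chain4

theorem pv_filter_true {p : Int → Bool} (a b : Int)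
    (h : ∀ x, a ≤ x → x < b → p x = true) :
    (PySem.List.pyRange a b 1).filter p = PySem.List.pyRange a b 1 := by
  rw [List.filter_eq_self]
  intro x hx
  rw [PySem.List.mem_pyRange_one] at hx
  exact h x hx.1 hx.2

theorem pv_filter_false {p : Int → Bool} (a b : Int)
    (h : ∀ x, a ≤ x → x < b → p x = false) :
    (PySem.List.pyRange a b 1).filter p = [] := by
  rw [List.filter_eq_nil_iff]
  intro x hx
  rw [PySem.List.mem_pyRange_one] at hx
  simp [h x hx.1 hx.2]

theorem pv_range_last (size : Int) (_h : 1 ≤ size) :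
    PySem.List.pyRange (size - 1) size 1 = [size - 1] := by
  have := PySem.List.pyRange_one_singleton (size - 1)
  rwa [sub_add_cancel] at this

theorem pv_range01 : PySem.List.pyRange 0 1 1 = [0] := by
  have := PySem.List.pyRange_one_singleton (0 : Int)
  simpa using this

-- split [0,size) into {0} ++ [1,size-1) ++ {size-1}, for size ≥ 2
theorem pv_split (size : Int) (h : 2 ≤ size) :
    PySem.List.pyRange 0 size 1 =
      [0] ++ PySem.List.pyRange 1 (size - 1) 1 ++ [size - 1] := by
  rw [PySem.List.pyRange_one_append 0 1 size (by omega) (by omega),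
      PySem.List.pyRange_one_append 1 (size - 1) size (by omega) (by omega),
      pv_range_last size (by omega), pv_range01, List.append_assoc]

-- the heart: A's filtered row equals B's constructed row
theorem pv_row_eq (st size i : Int) (hst0 : 0 ≤ st) (hst4 : st < 4)
    (hi0 : 0 ≤ i) (hi : i < size) :
    (PySem.List.pyRange 0 size 1).filter (pvCondA st size i) = pvRowB st size i := by
  have hsz : 1 ≤ size := by omega
  interval_cases st
  · -- st = 0
    by_cases h2 : 2 ≤ size
    · rw [pv_split size h2, List.filter_append, List.filter_append]
      rw [pv_filter_true 1 (size - 1) (fun x hx1 hx2 => by rw [pvCondA0_iff]; omega)]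
      simp only [pvRowB, List.filter_cons, List.filter_nil]
      have e1 : pvCondA 0 size i 0 = decide (5 ≤ size ∧ 2 ≤ i ∧ i < size - 2) :=
        pv_eq_decide (by rw [pvCondA0_iff]; omega)
      have e2 : pvCondA 0 size i (size - 1) = decide (1 ≤ i ∧ i < size - 1) :=
        pv_eq_decide (by rw [pvCondA0_iff]; omega)
      rw [e1, e2]
      by_cases c1 : 5 ≤ size ∧ 2 ≤ i ∧ i < size - 2 <;>
        by_cases c2 : 1 ≤ i ∧ i < size - 1 <;> simp [c1, c2]
    · have h1 : size = 1 := by omega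
      subst h1
      have h0 : i = 0 := by omega
      subst h0
      decide
  · -- st = 1
    by_cases hmidI : 1 ≤ i ∧ i < size - 1
    · rw [pv_split size (by omega), List.filter_append, List.filter_append]
      rw [pv_filter_true 1 (size - 1) (fun x hx1 hx2 => by rw [pvCondA1_iff]; omega)]
      simp only [pvRowB, List.filter_cons, List.filter_nil]
      have e2 : pvCondA 1 size i (size - 1) = false := by
        rw [Bool.eq_false_iff, Ne, pvCondA1_iff]; omega
      by_cases c1 : 2 ≤ i ∧ i < size - 2
      · have e1 : pvCondA 1 size i 0 = true := by rw [pvCondA1_iff]; omega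
        rw [e1, e2]
        simp [hmidI, c1]
      · have e1 : pvCondA 1 size i 0 = false := by
          rw [Bool.eq_false_iff, Ne, pvCondA1_iff]; omega
        rw [e1, e2]
        simp [hmidI, c1]
    · rw [pv_filter_false 0 size (fun x hx1 hx2 => by
        rw [Bool.eq_false_iff, Ne, pvCondA1_iff]; omega)]
      simp [pvRowB, hmidI]
  · -- st = 2
    by_cases hc : |i - PySem.Int.floordiv size 2| ≤ 1
    · rw [pv_filter_true 0 size (fun x hx1 hx2 => by
        rw [pvCondA2_iff]
        rw [abs_le] at hc
        omega)]
      unfold pvRowB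
      rw [if_neg (show ¬(2 : Int) = 0 by norm_num), if_neg (show ¬(2 : Int) = 1 by norm_num),
          if_pos rfl, if_pos hc]
    · have hc' : ¬(-1 ≤ i - PySem.Int.floordiv size 2 ∧ i - PySem.Int.floordiv size 2 ≤ 1) := by
        rw [← abs_le]; exact hc
      by_cases hmidI : 1 ≤ i ∧ i < size - 1
      · rw [pv_split size (by omega), List.filter_append, List.filter_append]
        rw [pv_filter_true 1 (size - 1) (fun x hx1 hx2 => by rw [pvCondA2_iff]; omega)]
        have e1 : pvCondA 2 size i 0 = false := by
          rw [Bool.eq_false_iff, Ne, pvCondA2_iff]; omega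
        have e2 : pvCondA 2 size i (size - 1) = false := by
          rw [Bool.eq_false_iff, Ne, pvCondA2_iff]; omega
        simp only [List.filter_cons, List.filter_nil, e1, e2]
        unfold pvRowB
        rw [if_neg (show ¬(2 : Int) = 0 by norm_num), if_neg (show ¬(2 : Int) = 1 by norm_num),
            if_pos rfl, if_neg hc, if_pos hmidI]
        simp
      · rw [pv_filter_false 0 size (fun x hx1 hx2 => by
          rw [Bool.eq_false_iff, Ne, pvCondA2_iff]; omega)]
        unfold pvRowB
        rw [if_neg (show ¬(2 : Int) = 0 by norm_num), if_neg (show ¬(2 : Int) = 1 by norm_num),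
            if_pos rfl, if_neg hc, if_neg hmidI]
  · -- st = 3
    by_cases hmidI : 1 ≤ i ∧ i < size - 1
    · rw [pv_filter_true 0 size (fun x hx1 hx2 => by rw [pvCondA3_iff]; omega)]
      simp [pvRowB, hmidI]
    · by_cases h2 : 2 ≤ size
      · rw [PySem.List.pyRange_one_append 0 1 size (by omega) (by omega),
            PySem.List.pyRange_one_append 1 2 size (by omega) (by omega),
            List.filter_append, List.filter_append]
        rw [pv_filter_false 0 1 (fun x hx1 hx2 => by
          rw [Bool.eq_false_iff, Ne, pvCondA3_iff]; omega)]
        rw [pv_filter_true 1 2 (fun x hx1 hx2 => by rw [pvCondA3_iff]; omega)]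
        rw [pv_filter_false 2 size (fun x hx1 hx2 => by
          rw [Bool.eq_false_iff, Ne, pvCondA3_iff]; omega)]
        rw [show PySem.List.pyRange 1 2 1 = [1] from by
          have := PySem.List.pyRange_one_singleton (1 : Int); simpa using this]
        simp [pvRowB, hmidI, h2]
      · have h1 : size = 1 := by omega
        subst h1
        have h0 : i = 0 := by omega
        subst h0
        decide

-- ===== VERDICT (by name: the statement is the Claim_ definition above) =====
theorem make_shape_spec : Claim_equal_make_shape := by
  intro word size _
  unfold Spec_make_shape make_shape make_shape_alt
  set st : Int := PySem.Int.mod (word.toList.foldl (fun a c => a + (c.toNat : Int)) 0) 4 with hst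
  have hst0 : 0 ≤ st := PySem.Int.mod_nonneg _ (by norm_num)
  have hst4 : st < 4 := PySem.Int.mod_lt _ (by norm_num)
  apply PySem.List.foldl_congr_mem
  intro acc i hi
  rw [PySem.List.mem_pyRange_one] at hi
  rw [PySem.List.foldl_append_if (pvCondA st size i) (fun j => (i, j))]
  rw [pv_row_eq st size i hst0 hst4 hi.1 hi.2]
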